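-- pv_equiv track=rewrite | github.com/Lim-XY/MCC2024 | XORTheStringBruteforce.py | transform
-- ===== SOURCE A (Python) =====
-- def transform(string, k):
--     for _ in range(k):
--         new_string = ''
--         for index in range(len(string)):
--             new_string += string[index]
--             if index < len(string) - 1:
--                 new_string += str(int(string[index]) ^ int(string[index+1]))
--
--         string = new_string
--
--     return string
-- ===== SOURCE B (Python) =====
-- def transform(string, k):
--     # Recursive pair decomposition: expand each adjacent pair independently
--     # (one XOR-insert step, then recurse with k-1), then join the pieces,
--     # dropping the shared boundary character of every piece after the first.
--     if len(string) < 2 or k <= 0: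
--         return string
--     pieces = []
--     for a, b in zip(string, string[1:]):
--         seg = transform(a + str(int(a) ^ int(b)) + b, k - 1)
--         pieces.append(seg if not pieces else seg[1:])
--     return ''.join(pieces)
-- ===== Notes on version B (the rewrite author's own statement) =====
-- stated objective: alternative
-- what changed: A rebuilds the whole string k times in an iterative index loop; B recursively decomposes the string into adjacent pairs, expands each pair one XOR-insert step and recurses with k-1, then joins the pieces dropping each shared boundary character (and returns immediately when len<2 or k<=0).
import Mathlib
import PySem

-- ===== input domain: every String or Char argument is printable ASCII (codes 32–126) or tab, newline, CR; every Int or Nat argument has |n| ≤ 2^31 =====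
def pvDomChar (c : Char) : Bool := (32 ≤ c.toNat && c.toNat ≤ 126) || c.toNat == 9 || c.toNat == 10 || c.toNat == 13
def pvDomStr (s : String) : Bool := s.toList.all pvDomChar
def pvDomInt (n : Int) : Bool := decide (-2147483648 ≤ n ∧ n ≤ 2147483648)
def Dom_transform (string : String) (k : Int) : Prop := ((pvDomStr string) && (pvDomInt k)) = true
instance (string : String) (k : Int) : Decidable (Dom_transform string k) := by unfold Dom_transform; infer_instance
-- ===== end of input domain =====

-- B replaces A's k-fold whole-string rebuild by a recursive pair decomposition
-- (expand each adjacent pair one step, recurse with k-1, join dropping shared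
-- boundary chars); objective: alternative algorithm, same output on Pre_.

-- str(int(a) ^ int(b)) for two characters, as in both Pythons
-- (int() raising on a non-digit is excluded by Pre_transform; getD 0 is never reached there)
def pvIns (a b : Char) : List Char :=
  PySem.Int.toChars (PySem.Int.bxor ((PySem.Int.ofChars? [a]).getD 0) ((PySem.Int.ofChars? [b]).getD 0))

-- ===== PORT A =====
def transform (string : String) (k : Int) : String :=
  (PySem.List.pyRange 0 k 1).foldl (fun s _ =>
    -- new_string = ''; for index in range(len(string)): …
    let cs := s.toList
    let n := cs.length
    String.ofList ((List.range n).foldl (fun acc index =>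
      let acc := acc ++ [cs.getD index ' ']          -- new_string += string[index] (index in range)
      if index < n - 1 then
        acc ++ pvIns (cs.getD index ' ') (cs.getD (index + 1) ' ')
      else acc) [])) string

-- ===== PORT B =====
-- recursion of Source B's transform, on the (nonnegative) recursion depth k
def transformAltGo : Nat → List Char → List Char
  | 0, cs => cs                                       -- the 'k <= 0' guard
  | Nat.succ k, cs =>
    if cs.length < 2 then cs
    else
      -- for a, b in zip(string, string[1:]): pieces.append(seg or seg[1:])
      ((cs.zip cs.tail).foldl (fun pieces ab =>
        let seg := transformAltGo k (ab.1 :: (pvIns ab.1 ab.2 ++ [ab.2]))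
        pieces ++ [if pieces.isEmpty then seg else seg.drop 1]) []).flatten

def transform_alt (string : String) (k : Int) : String :=
  if string.toList.length < 2 ∨ k ≤ 0 then string
  else String.ofList (transformAltGo k.toNat string.toList)

-- ===== PRECONDITION & SPEC =====
-- Pre_ excludes exactly the inputs where Python's int(c) raises ValueError:
-- a string of length ≥ 2 containing a non-digit character, with k ≥ 1.
def Pre_transform (string : String) (k : Int) : Prop :=
  k ≤ 0 ∨ string.toList.length < 2 ∨ string.toList.all Char.isDigit = true
instance (string : String) (k : Int) : Decidable (Pre_transform string k) := by
  unfold Pre_transform; infer_instance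

def pvWitness_transform : String × Int := ("93", 3)

def Spec_transform (string : String) (k : Int) (out : String) : Prop := out = transform_alt string k
instance (string : String) (k : Int) (out : String) : Decidable (Spec_transform string k out) := by unfold Spec_transform; infer_instance

-- ===== CLAIM (what is proved, stated in full; the proofs are below) =====
def Claim_equal_transform : Prop := ∀ (string : String) (k : Int), Dom_transform string k → Pre_transform string k → Spec_transform string k (transform string k)

-- ===== LEMMAS AND PROOFS =====

-- one XOR-insert pass of A, as structural recursion (proof-side characterization)
def pvStep : List Char → List Char
  | [] => []
  | [a] => [a]
  | a :: b :: t => a :: (pvIns a b ++ pvStep (b :: t))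

theorem pvStep_head (a : Char) (v : List Char) : ∃ w, pvStep (a :: v) = a :: w := by
  cases v with
  | nil => exact ⟨[], rfl⟩
  | cons b t => exact ⟨_, rfl⟩

theorem pvStep_iter_head (k : Nat) (a : Char) (v : List Char) :
    ∃ w, pvStep^[k] (a :: v) = a :: w := by
  induction k generalizing v with
  | zero => exact ⟨v, rfl⟩
  | succ k ih =>
    obtain ⟨w₁, hw₁⟩ := pvStep_head a v
    obtain ⟨w, hw⟩ := ih w₁
    exact ⟨w, by rw [Function.iterate_succ_apply, hw₁, hw]⟩

theorem pvStep_last : ∀ (u : List Char) (a : Char), ∃ w, pvStep (u ++ [a]) = w ++ [a]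
  | [], a => ⟨[], rfl⟩
  | [c], a => ⟨c :: pvIns c a, by simp [pvStep]⟩
  | c :: d :: u', a => by
    obtain ⟨w, hw⟩ := pvStep_last (d :: u') a
    simp only [List.cons_append] at hw
    exact ⟨c :: (pvIns c d ++ w), by simp [pvStep, hw]⟩

-- the glue law: pvStep distributes over splitting at an interior character
theorem pvStep_glue : ∀ (u : List Char) (a : Char) (v : List Char),
    pvStep (u ++ a :: v) = pvStep (u ++ [a]) ++ (pvStep (a :: v)).drop 1
  | [], a, v => by
    obtain ⟨w, hw⟩ := pvStep_head a v
    simp [pvStep, hw]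
  | [c], a, v => by
    obtain ⟨w, hw⟩ := pvStep_head a v
    simp [pvStep, hw]
  | c :: d :: u', a, v => by
    have ih := pvStep_glue (d :: u') a v
    simp only [List.cons_append, pvStep] at ih ⊢
    simp [ih]

theorem pvStep_iter_glue (k : Nat) : ∀ (u : List Char) (a : Char) (v : List Char),
    pvStep^[k] (u ++ a :: v) = pvStep^[k] (u ++ [a]) ++ (pvStep^[k] (a :: v)).drop 1 := by
  induction k with
  | zero => intro u a v; simp
  | succ k ih =>
    intro u a v
    obtain ⟨w, hw⟩ := pvStep_last u a
    obtain ⟨w', hw'⟩ := pvStep_head a v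
    rw [Function.iterate_succ_apply, Function.iterate_succ_apply,
        Function.iterate_succ_apply, pvStep_glue, hw, hw']
    simp only [List.drop_succ_cons, List.drop_zero]
    rw [List.append_assoc, List.singleton_append, ih w a w']

theorem pvStep_short (cs : List Char) (h : cs.length < 2) : pvStep cs = cs := by
  match cs, h with
  | [], _ => rfl
  | [a], _ => rfl

-- the inner index loop, written as a flatMap over the index range
theorem pvFlat_eq_step : ∀ cs : List Char,
    (List.range cs.length).flatMap (fun i =>
      cs.getD i ' ' :: (if i < cs.length - 1 then pvIns (cs.getD i ' ') (cs.getD (i + 1) ' ') else []))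
      = pvStep cs
  | [] => rfl
  | [a] => by simp [pvStep]
  | a :: b :: t => by
    have ih := pvFlat_eq_step (b :: t)
    rw [show (a::b::t).length = (b::t).length + 1 from rfl, List.range_succ_eq_map,
        List.flatMap_cons, List.flatMap_map]
    have hfun : (fun (i : Nat) =>
        (a :: b :: t).getD i.succ ' ' ::
          (if i.succ < (b :: t).length + 1 - 1 then
            pvIns ((a :: b :: t).getD i.succ ' ') ((a :: b :: t).getD (i.succ + 1) ' ') else []))
        = (fun (i : Nat) =>
        (b :: t).getD i ' ' ::
          (if i < (b :: t).length - 1 then pvIns ((b :: t).getD i ' ') ((b :: t).getD (i + 1) ' ') else [])) := by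
      funext i
      simp only [List.length_cons, Nat.add_sub_cancel, Nat.succ_eq_add_one, List.getD_cons_succ,
        Nat.add_lt_add_iff_right]
    rw [hfun, ih]
    simp [pvStep]

-- A's inner index loop computes pvStep
theorem pvInner_eq_step (cs : List Char) :
    (List.range cs.length).foldl (fun acc index =>
      let acc2 := acc ++ [cs.getD index ' ']
      if index < cs.length - 1 then
        acc2 ++ pvIns (cs.getD index ' ') (cs.getD (index + 1) ' ')
      else acc2) []
      = pvStep cs := by
  have hcongr : ∀ (acc : List Char) (index : Nat),
      (let acc2 := acc ++ [cs.getD index ' ']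
       if index < cs.length - 1 then
         acc2 ++ pvIns (cs.getD index ' ') (cs.getD (index + 1) ' ')
       else acc2)
      = acc ++ (cs.getD index ' ' ::
          (if index < cs.length - 1 then pvIns (cs.getD index ' ') (cs.getD (index + 1) ' ') else [])) := by
    intro acc index
    split_ifs <;> simp
  calc (List.range cs.length).foldl _ []
      = (List.range cs.length).foldl (fun acc index =>
          acc ++ (cs.getD index ' ' ::
            (if index < cs.length - 1 then pvIns (cs.getD index ' ') (cs.getD (index + 1) ' ') else []))) [] := by
        exact PySem.List.foldl_congr_mem _ _ _ _ (fun acc index _ => hcongr acc index)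
    _ = pvStep cs := by
        rw [PySem.List.foldl_append_eq_flatMap, List.nil_append, pvFlat_eq_step]

-- the pieces loop of B, once the accumulator is nonempty, only appends dropped segments
theorem pvFoldl_pieces (f : Char × Char → List Char) :
    ∀ (l : List (Char × Char)) (ps0 : List (List Char)), ps0 ≠ [] →
      l.foldl (fun ps ab => ps ++ [if ps.isEmpty then f ab else (f ab).drop 1]) ps0
        = ps0 ++ l.map (fun ab => (f ab).drop 1) := by
  intro l
  induction l with
  | nil => intro ps0 _; simp
  | cons ab rest ih =>
    intro ps0 h
    have h0 : ps0.isEmpty = false := by simpa [List.isEmpty_iff] using h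
    simp only [List.foldl_cons, h0, Bool.false_eq_true, if_false]
    rw [ih _ (by simp)]
    simp

-- B's pieces loop over the pairs of a::b::t computes pvStep^[k] ∘ pvStep
theorem pvPieces_flatten (k : Nat) (hk : ∀ cs, transformAltGo k cs = pvStep^[k] cs) :
    ∀ (t : List Char) (a b : Char),
      (((a :: b :: t).zip (b :: t)).foldl (fun pieces ab =>
          pieces ++ [if pieces.isEmpty then transformAltGo k (ab.1 :: (pvIns ab.1 ab.2 ++ [ab.2]))
                     else (transformAltGo k (ab.1 :: (pvIns ab.1 ab.2 ++ [ab.2]))).drop 1]) []).flatten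
        = pvStep^[k] (pvStep (a :: b :: t)) := by
  intro t
  induction t with
  | nil =>
    intro a b
    simp [hk, pvStep]
  | cons c t' ih =>
    intro a b
    have hrest := ih b c
    -- unroll the fold on both the goal and ih
    simp only [List.zip_cons_cons, List.foldl_cons, List.isEmpty_nil, if_true,
      List.nil_append] at hrest ⊢
    rw [pvFoldl_pieces _ _ _ (by simp)] at hrest ⊢
    obtain ⟨w₂, hw₂⟩ := pvStep_iter_head k b (pvIns b c ++ [c])
    have hseg : transformAltGo k (b :: (pvIns b c ++ [c])) = b :: w₂ := by rw [hk, hw₂]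
    simp only [List.isEmpty_cons, Bool.false_eq_true, if_false, List.flatten_append,
      List.flatten_cons, List.flatten_nil, List.append_nil] at hrest ⊢
    -- rewrite the right-hand side via the glue law
    have hrhs : pvStep (a :: b :: c :: t')
        = (a :: pvIns a b) ++ b :: (pvIns b c ++ pvStep (c :: t')) := by
      simp [pvStep]
    rw [hrhs, pvStep_iter_glue k (a :: pvIns a b) b (pvIns b c ++ pvStep (c :: t'))]
    have hbw : (b :: (pvIns b c ++ pvStep (c :: t'))) = pvStep (b :: c :: t') := rfl
    rw [hbw, ← hrest, hseg]
    simp [hk]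

-- B's recursion computes the k-fold iterate of pvStep
theorem altGo_eq_iter : ∀ (k : Nat) (cs : List Char), transformAltGo k cs = pvStep^[k] cs := by
  intro k
  induction k with
  | zero => intro cs; rfl
  | succ k ih =>
    intro cs
    match cs with
    | [] => simp [transformAltGo, Function.iterate_fixed (pvStep_short [] (by simp))]
    | [a] => simp [transformAltGo, Function.iterate_fixed (pvStep_short [a] (by simp))]
    | a :: b :: t =>
      rw [Function.iterate_succ_apply]
      have := pvPieces_flatten k ih t a b
      simpa [transformAltGo] using this

-- the outer loop: a foldl that ignores the range elements is an iterate
theorem pvFoldl_const_iter {α β : Type} (F : α → α) :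
    ∀ (l : List β) (s : α), l.foldl (fun s _ => F s) s = F^[l.length] s := by
  intro l
  induction l with
  | nil => intro s; rfl
  | cons x rest ih => intro s; simp [List.foldl_cons, ih, Function.iterate_succ_apply]

-- the string-level step iterated, pushed down to lists of characters
theorem pvIter_ofList (n : Nat) :
    ∀ s : String,
      (fun s : String => String.ofList (pvStep s.toList))^[n] s = String.ofList (pvStep^[n] s.toList) := by
  induction n with
  | zero => intro s; simp
  | succ n ih =>
    intro s
    rw [Function.iterate_succ_apply, Function.iterate_succ_apply, ih, String.toList_ofList]

-- ===== VERDICT (by name: the statement is the Claim_ definition above) =====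
theorem transform_spec : Claim_equal_transform := by
  unfold Claim_equal_transform Spec_transform
  intro string k _ _
  unfold transform transform_alt
  rw [pvFoldl_const_iter]
  have hF : (fun s : String =>
      let cs := s.toList
      let n := cs.length
      String.ofList ((List.range n).foldl (fun acc index =>
        let acc := acc ++ [cs.getD index ' ']
        if index < n - 1 then
          acc ++ pvIns (cs.getD index ' ') (cs.getD (index + 1) ' ')
        else acc) []))
      = (fun s : String => String.ofList (pvStep s.toList)) := by
    funext s
    exact congrArg String.ofList (pvInner_eq_step s.toList)
  rw [hF, pvIter_ofList]
  have hlen : (PySem.List.pyRange 0 k 1).length = k.toNat := by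
    simp [PySem.List.length_pyRange_one]
  rw [hlen]
  by_cases hk0 : k ≤ 0
  · rw [if_pos (Or.inr hk0), Int.toNat_of_nonpos hk0]
    simp [String.ofList_toList]
  · by_cases hshort : string.toList.length < 2
    · rw [if_pos (Or.inl hshort), Function.iterate_fixed (pvStep_short _ hshort),
        String.ofList_toList]
    · rw [if_neg (by tauto), altGo_eq_iter]
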